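-- pv_equiv track=rewrite | github.com/mohammadfaiizan/ProjectI | DSA/Problem/Trie/06_Bit_Manipulation_Optimization/1178_Number_of_Valid_Words_for_Each_Puzzle.py | find_num_words_trie_bitmask
-- ===== SOURCE A (Python) =====
-- from typing import List, Dict, Set
--
-- class TrieNode:
--     """Trie node with bitmask support"""
--     def __init__(self):
--         self.children = {}
--         self.word_count = 0
--         self.bitmask = 0
--
-- def find_num_words_trie_bitmask(words: List[str], puzzles: List[str]) -> List[int]:
--     """
--     Approach 3: Trie with Bitmask Optimization
--
--     Build trie based on bitmasks with count tracking.
--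
--     Time: O(w * unique_chars + p * 2^7)
--     Space: O(trie_size)
--     """
--     def string_to_mask(s: str) -> int:
--         """Convert string to bitmask"""
--         mask = 0
--         for c in s:
--             mask |= (1 << (ord(c) - ord('a')))
--         return mask
--
--     # Build trie of word bitmasks
--     root = TrieNode()
--
--     for word in words:
--         mask = string_to_mask(word)
--         node = root
--
--         # Traverse trie based on set bits
--         for i in range(26):
--             if mask & (1 << i):
--                 if i not in node.children:
--                     node.children[i] = TrieNode()
--                 node = node.children[i]
--                 node.bitmask |= (1 << i)
--
--         node.word_count += 1
--
--     def count_valid_words(node: TrieNode, puzzle_mask: int,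
--                         first_bit: int, has_first: bool) -> int:
--         """Count valid words in trie subtree"""
--         count = 0
--
--         # If current node represents complete words and has first letter
--         if has_first:
--             count += node.word_count
--
--         # Explore children
--         for bit_pos, child in node.children.items():
--             bit = 1 << bit_pos
--
--             # Only explore if bit is in puzzle
--             if puzzle_mask & bit:
--                 new_has_first = has_first or (bit & first_bit)
--                 count += count_valid_words(child, puzzle_mask, first_bit, new_has_first)
--
--         return count
--
--     result = []
--
--     for puzzle in puzzles:
--         puzzle_mask = string_to_mask(puzzle)
--         first_bit = 1 << (ord(puzzle[0]) - ord('a'))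
--
--         count = count_valid_words(root, puzzle_mask, first_bit, False)
--         result.append(count)
--
--     return result
-- ===== SOURCE B (Python) =====
-- from typing import List
--
--
-- def find_num_words_trie_bitmask(words: List[str], puzzles: List[str]) -> List[int]:
--     # Flat frequency table of word bitmasks + per-puzzle scan over distinct masks
--     # (no trie, no recursion).
--     counts = {}
--     for word in words:
--         m = 0
--         for c in word:
--             m |= 1 << (ord(c) - ord('a'))
--         counts[m] = counts.get(m, 0) + 1
--
--     result = []
--     for puzzle in puzzles:
--         pm = 0
--         for c in puzzle:
--             pm |= 1 << (ord(c) - ord('a'))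
--         fb = 1 << (ord(puzzle[0]) - ord('a'))
--         total = 0
--         for m, cnt in counts.items():
--             if m & fb != 0 and (m | pm) == pm:
--                 total += cnt
--         result.append(total)
--     return result
-- ===== Notes on version B (the rewrite author's own statement) =====
-- stated objective: alternative
-- what changed: Replaces the bit-by-bit trie (per-word insertion along set bits and recursive subtree descent per puzzle) with a flat frequency table of word bitmasks scanned once per puzzle with a subset-plus-first-letter test.
-- outside the precondition, e.g. on find_num_words_trie_bitmask(['a{'], ['a']): A returns [1], B returns [0]
import Mathlib
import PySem

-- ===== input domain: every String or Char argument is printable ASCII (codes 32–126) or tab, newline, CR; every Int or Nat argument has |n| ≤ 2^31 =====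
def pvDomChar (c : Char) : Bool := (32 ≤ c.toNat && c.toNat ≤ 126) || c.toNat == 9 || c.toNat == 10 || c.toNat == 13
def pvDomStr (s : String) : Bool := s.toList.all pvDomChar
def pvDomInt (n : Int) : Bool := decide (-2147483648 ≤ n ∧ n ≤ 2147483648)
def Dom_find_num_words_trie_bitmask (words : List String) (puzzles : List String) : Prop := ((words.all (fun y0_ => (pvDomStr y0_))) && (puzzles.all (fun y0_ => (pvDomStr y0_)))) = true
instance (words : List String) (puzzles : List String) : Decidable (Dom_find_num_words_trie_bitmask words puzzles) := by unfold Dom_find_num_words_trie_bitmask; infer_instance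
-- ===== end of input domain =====

-- B replaces A's bitwise trie by a flat frequency table of word bitmasks with a
-- per-puzzle subset test (alternative algorithm, similar cost).

-- ===== PORT A =====

-- Trie node: children (insertion-ordered assoc list, explicit child-list type
-- because nested inductives are not allowed), word_count, bitmask.
mutual
inductive PVTrie : Type
  | mk : PVChildren → Int → Nat → PVTrie
inductive PVChildren : Type
  | nil : PVChildren
  | cons : Nat → PVTrie → PVChildren → PVChildren
end

def pvEmptyNode : PVTrie := .mk .nil 0 0

-- dict lookup (first match) on the children list
def chGet? : PVChildren → Nat → Option PVTrie
  | .nil, _ => none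
  | .cons b t rest, i => if b = i then some t else chGet? rest i

-- dict store: overwrite in place, new key appended
def chSet : PVChildren → Nat → PVTrie → PVChildren
  | .nil, i, t => .cons i t .nil
  | .cons b t0 rest, i, t => if b = i then .cons b t rest else .cons b t0 (chSet rest i t)

-- string_to_mask (A's helper)
def strMask (s : String) : Nat :=
  s.toList.foldl (fun m c => m ||| (1 <<< (c.toNat - 97))) 0

-- child.bitmask |= (1 << i)  (the update done when stepping into a child)
def bumpBm (t : PVTrie) (i : Nat) : PVTrie :=
  match t with
  | .mk ch wc bm => .mk ch wc (bm ||| (1 <<< i))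

-- the 'for i in range(26)' insertion loop, with the final word_count += 1
def insertBits (t : PVTrie) (mask : Nat) (i : Nat) : PVTrie :=
  if h : i < 26 then
    if mask &&& (1 <<< i) != 0 then
      match t with
      | .mk ch wc bm =>
        let c := bumpBm ((chGet? ch i).getD pvEmptyNode) i
        PVTrie.mk (chSet ch i (insertBits c mask (i + 1))) wc bm
    else insertBits t mask (i + 1)
  else
    match t with
    | .mk ch wc bm => PVTrie.mk ch (wc + 1) bm
termination_by 26 - i
decreasing_by all_goals omega

-- count_valid_words (mutual recursion over node / children list)
mutual
def countValid : PVTrie → Nat → Nat → Bool → Int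
  | .mk ch wc _, pm, fb, hf =>
      (if hf then wc else 0) + countValidCh ch pm fb hf
def countValidCh : PVChildren → Nat → Nat → Bool → Int
  | .nil, _, _, _ => 0
  | .cons bit c rest, pm, fb, hf =>
      (if pm &&& (1 <<< bit) != 0 then
        countValid c pm fb (hf || ((1 <<< bit) &&& fb != 0))
      else 0) + countValidCh rest pm fb hf
end

def find_num_words_trie_bitmask (words : List String) (puzzles : List String) : List Int :=
  let root := words.foldl (fun r w => insertBits r (strMask w) 0) pvEmptyNode
  puzzles.foldl (fun res p =>
    match PySem.Str.pyGet? p 0 with  -- puzzle[0]; none = IndexError, excluded by Pre_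
    | some c => res ++ [countValid root (strMask p) (1 <<< (c.toNat - 97)) false]
    | none => res ++ [0]) []

-- ===== PORT B =====
-- (B's inline mask loops are the same 'm |= 1 << (ord(c) - 97)' fold; the port
-- reuses strMask for them)

def find_num_words_trie_bitmask_alt (words : List String) (puzzles : List String) : List Int :=
  let counts : PySem.Dict Nat Int :=
    words.foldl (fun d w => d.modify (strMask w) 0 (fun v => v + 1)) PySem.Dict.empty
  puzzles.foldl (fun res p =>
    let pm := strMask p
    match PySem.Str.pyGet? p 0 with  -- puzzle[0]; none = IndexError, excluded by Pre_
    | some c =>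
      let fb := 1 <<< (c.toNat - 97)
      res ++ [counts.items.foldl
        (fun acc kv => if kv.1 &&& fb != 0 && (kv.1 ||| pm) == pm then acc + kv.2 else acc) 0]
    | none => res ++ [0]) []

-- ===== PRECONDITION & SPEC =====

-- Pre_ excludes: empty puzzles and characters below 'a' anywhere (there A raises
-- IndexError resp. ValueError 'negative shift count'), and words containing
-- characters above 'z' — such words lie outside the function's lowercase-word
-- alphabet and A's fixed range(26) trie loop drops their high letters from the
-- mask while B keeps them, neither behaviour being specified.
def Pre_find_num_words_trie_bitmask (words : List String) (puzzles : List String) : Prop :=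
  ((words.all fun w => w.toList.all fun c => 97 ≤ c.toNat && c.toNat ≤ 122) &&
   (puzzles.all fun p => !p.toList.isEmpty && p.toList.all fun c => 97 ≤ c.toNat)) = true
instance (words : List String) (puzzles : List String) : Decidable (Pre_find_num_words_trie_bitmask words puzzles) := by
  unfold Pre_find_num_words_trie_bitmask; infer_instance

def pvWitness_find_num_words_trie_bitmask : List String × List String :=
  (["ab", "a"], ["ab"])

def Spec_find_num_words_trie_bitmask (words : List String) (puzzles : List String) (out : List Int) : Prop := out = find_num_words_trie_bitmask_alt words puzzles
instance (words : List String) (puzzles : List String) (out : List Int) : Decidable (Spec_find_num_words_trie_bitmask words puzzles out) := by unfold Spec_find_num_words_trie_bitmask; infer_instance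

-- ===== CLAIM (what is proved, stated in full; the proofs are below) =====
def Claim_equal_find_num_words_trie_bitmask : Prop := ∀ (words : List String) (puzzles : List String), Dom_find_num_words_trie_bitmask words puzzles → Pre_find_num_words_trie_bitmask words puzzles → Spec_find_num_words_trie_bitmask words puzzles (find_num_words_trie_bitmask words puzzles)


-- ===== LEMMAS AND PROOFS =====

-- bit facts
theorem pv_and_eq_zero_iff (m fb : Nat) : m &&& fb = 0 ↔ ∀ j, ¬(m.testBit j ∧ fb.testBit j) := by
  constructor
  · intro h j ⟨h1, h2⟩
    have := Nat.testBit_and m fb j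
    rw [h] at this; simp [h1, h2] at this
  · intro h
    apply Nat.eq_of_testBit_eq
    intro j
    simp only [Nat.testBit_and, Nat.zero_testBit, Bool.and_eq_false_iff]
    have := h j
    by_cases h1 : m.testBit j = true
    · right; simp [h1] at this; simp [this]
    · left; simp at h1; exact h1

theorem pv_or_eq_iff (m pm : Nat) : m ||| pm = pm ↔ ∀ j, m.testBit j → pm.testBit j := by
  constructor
  · intro h j hm
    have := congrArg (fun x => x.testBit j) h
    simp only [Nat.testBit_or, hm, Bool.true_or] at this
    exact this.symm
  · intro h
    apply Nat.eq_of_testBit_eq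
    intro j
    simp only [Nat.testBit_or]
    by_cases h1 : m.testBit j = true
    · simp [h1, h j h1]
    · simp at h1; simp [h1]

theorem pv_and_shift_iff (a : Nat) (i : Nat) : (a &&& 1 <<< i ≠ 0) ↔ a.testBit i := by
  rw [Nat.one_shiftLeft, Nat.and_two_pow]
  cases h : a.testBit i <;> simp [Nat.pow_eq_zero]

theorem pv_shift_and_iff (a : Nat) (i : Nat) : (1 <<< i &&& a ≠ 0) ↔ a.testBit i := by
  rw [Nat.and_comm]; exact pv_and_shift_iff a i

theorem pv_testBit_hi (m i : Nat) (h : m < 2 ^ 26) (hj : 26 ≤ i) : m.testBit i = false := by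
  apply Nat.testBit_eq_false_of_lt
  calc m < 2 ^ 26 := h
    _ ≤ 2 ^ i := Nat.pow_le_pow_right (by omega) hj

-- the path condition tracked by A's insertion/count recursion from bit i on
def pvCond (m pm fb : Nat) (i : Nat) (hf : Bool) : Bool :=
  ((List.range 26).all fun j => decide (i ≤ j → m.testBit j = true → pm.testBit j = true)) &&
  (hf || (List.range 26).any fun j => decide (i ≤ j ∧ m.testBit j = true ∧ fb.testBit j = true))

theorem pvCond_iff (m pm fb i : Nat) (hf : Bool) : pvCond m pm fb i hf = true ↔
    ((∀ j, j < 26 → i ≤ j → m.testBit j → pm.testBit j) ∧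
     (hf = true ∨ ∃ j, j < 26 ∧ i ≤ j ∧ m.testBit j ∧ fb.testBit j)) := by
  simp only [pvCond, Bool.and_eq_true, Bool.or_eq_true, List.all_eq_true, List.any_eq_true,
    List.mem_range, decide_eq_true_iff]

-- the contribution of the child stored under key i to countValidCh
def pvContrib (pm fb : Nat) (hf : Bool) (i : Nat) (t : PVTrie) : Int :=
  if pm &&& (1 <<< i) != 0 then countValid t pm fb (hf || ((1 <<< i) &&& fb != 0)) else 0

theorem countValid_mk (ch : PVChildren) (wc : Int) (bm : Nat) (pm fb : Nat) (hf : Bool) :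
    countValid (PVTrie.mk ch wc bm) pm fb hf = (if hf then wc else 0) + countValidCh ch pm fb hf := by
  rw [countValid]

theorem countValid_empty (pm fb : Nat) (hf : Bool) : countValid pvEmptyNode pm fb hf = 0 := by
  simp [pvEmptyNode, countValid, countValidCh]

theorem countValidCh_chSet (pm fb : Nat) (hf : Bool) (i : Nat) (t' : PVTrie) :
    ∀ ch : PVChildren, countValidCh (chSet ch i t') pm fb hf =
      countValidCh ch pm fb hf + pvContrib pm fb hf i t'
        - pvContrib pm fb hf i ((chGet? ch i).getD pvEmptyNode)
  | .nil => by
      simp [chSet, chGet?, countValidCh, pvContrib, countValid_empty]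
  | .cons b t0 rest => by
      have ih := countValidCh_chSet pm fb hf i t' rest
      by_cases hb : b = i
      · subst hb
        simp [chSet, chGet?, countValidCh, pvContrib]
        split <;> omega
      · simp [chSet, chGet?, hb, countValidCh, ih]
        omega

theorem countValid_bumpBm (t : PVTrie) (i : Nat) (pm fb : Nat) (hf : Bool) :
    countValid (bumpBm t i) pm fb hf = countValid t pm fb hf := by
  cases t with
  | mk ch wc bm => rw [bumpBm, countValid, countValid]

theorem pvCond_base (m pm fb : Nat) (hf : Bool) : (pvCond m pm fb 26 hf = true) ↔ hf = true := by
  rw [pvCond_iff]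
  constructor
  · rintro ⟨_, h | ⟨j, hj⟩⟩
    · exact h
    · omega
  · intro h; exact ⟨by omega, Or.inl h⟩

theorem pvCond_step_unset (m pm fb : Nat) (i : Nat) (hf : Bool) (hmb : m.testBit i = false) :
    (pvCond m pm fb (i + 1) hf = true) ↔ (pvCond m pm fb i hf = true) := by
  rw [pvCond_iff, pvCond_iff]
  constructor
  · rintro ⟨h1, h2⟩
    refine ⟨fun j hj hij hmj => ?_, ?_⟩
    · by_cases hji : j = i
      · subst hji; rw [hmb] at hmj; exact absurd hmj (by simp)
      · exact h1 j hj (by omega) hmj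
    · rcases h2 with h | ⟨j, hj1, hj2, hj3⟩
      · exact Or.inl h
      · exact Or.inr ⟨j, hj1, by omega, hj3⟩
  · rintro ⟨h1, h2⟩
    refine ⟨fun j hj hij hmj => h1 j hj (by omega) hmj, ?_⟩
    rcases h2 with h | ⟨j, hj1, hj2, hj3, hj4⟩
    · exact Or.inl h
    · by_cases hji : j = i
      · subst hji; rw [hmb] at hj3; exact absurd hj3 (by simp)
      · exact Or.inr ⟨j, hj1, by omega, hj3, hj4⟩

theorem pvCond_step_set (m pm fb : Nat) (i : Nat) (hf : Bool) (hi : i < 26)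
    (hmb : m.testBit i = true) (hpm : pm.testBit i = true) :
    (pvCond m pm fb (i + 1) (hf || (1 <<< i &&& fb != 0)) = true) ↔ (pvCond m pm fb i hf = true) := by
  have hfb : ((1 <<< i &&& fb != 0) = true) ↔ fb.testBit i = true := by
    rw [bne_iff_ne]; exact pv_shift_and_iff fb i
  rw [pvCond_iff, pvCond_iff]
  constructor
  · rintro ⟨h1, h2⟩
    refine ⟨fun j hj hij hmj => ?_, ?_⟩
    · by_cases hji : j = i
      · subst hji; exact hpm
      · exact h1 j hj (by omega) hmj
    · rcases h2 with h | ⟨j, hj1, hj2, hj3, hj4⟩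
      · rcases Bool.or_eq_true_iff.mp h with h' | h'
        · exact Or.inl h'
        · exact Or.inr ⟨i, hi, le_refl i, hmb, hfb.mp h'⟩
      · exact Or.inr ⟨j, hj1, by omega, hj3, hj4⟩
  · rintro ⟨h1, h2⟩
    refine ⟨fun j hj hij hmj => h1 j hj (by omega) hmj, ?_⟩
    rcases h2 with h | ⟨j, hj1, hj2, hj3, hj4⟩
    · exact Or.inl (by simp [h])
    · by_cases hji : j = i
      · subst hji
        exact Or.inl (by rw [Bool.or_eq_true_iff]; exact Or.inr (hfb.mpr hj4))
      · exact Or.inr ⟨j, hj1, by omega, hj3, hj4⟩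

theorem pvCond_fail (m pm fb : Nat) (i : Nat) (hf : Bool) (hi : i < 26)
    (hmb : m.testBit i = true) (hpm : pm.testBit i = false) :
    ¬ (pvCond m pm fb i hf = true) := by
  rw [pvCond_iff]
  rintro ⟨h1, _⟩
  have := h1 i hi (le_refl i) hmb
  rw [hpm] at this
  exact absurd this (by simp)

theorem pvCond_zero (m pm fb : Nat) (hm : m < 2 ^ 26) :
    (pvCond m pm fb 0 false = true) ↔ ((m &&& fb != 0 && ((m ||| pm) == pm)) = true) := by
  rw [Bool.and_eq_true, bne_iff_ne, beq_iff_eq, pvCond_iff]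
  constructor
  · rintro ⟨h1, h2⟩
    refine ⟨?_, ?_⟩
    · rcases h2 with h | ⟨j, hj1, _, hj3, hj4⟩
      · simp at h
      · intro hz
        exact absurd ⟨hj3, hj4⟩ ((pv_and_eq_zero_iff m fb).mp hz j)
    · refine (pv_or_eq_iff m pm).mpr (fun j hj => ?_)
      by_cases hjlt : j < 26
      · exact h1 j hjlt (by omega) hj
      · rw [pv_testBit_hi m j hm (by omega)] at hj; exact absurd hj (by simp)
  · rintro ⟨h1, h2⟩
    constructor
    · intro j hj _ hmj; exact (pv_or_eq_iff m pm).mp h2 j hmj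
    · right
      have hex : ¬ ∀ j, ¬(m.testBit j = true ∧ fb.testBit j = true) :=
        fun hall => h1 ((pv_and_eq_zero_iff m fb).mpr hall)
      push Not at hex
      obtain ⟨j, hj⟩ := hex
      refine ⟨j, ?_, by omega, hj.1, hj.2⟩
      by_contra hge
      rw [pv_testBit_hi m j hm (by omega)] at hj
      simp at hj

theorem countValid_insertBits (pm fb m : Nat) :
    ∀ (n i : Nat) (t : PVTrie) (hf : Bool), i + n = 26 →
      countValid (insertBits t m i) pm fb hf =
        countValid t pm fb hf + (if pvCond m pm fb i hf then 1 else 0) := by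
  intro n
  induction n with
  | zero =>
      intro i t hf hi
      have h26 : i = 26 := by omega
      subst h26
      rw [insertBits.eq_def, dif_neg (by omega)]
      cases t with
      | mk ch wc bm =>
          rw [countValid_mk, countValid_mk]
          rw [if_congr (pvCond_base m pm fb hf) rfl rfl]
          cases hf <;> simp
          omega
  | succ n ih =>
      intro i t hf hi
      have hlt : i < 26 := by omega
      rw [insertBits.eq_def, dif_pos hlt]
      by_cases hmb : m.testBit i = true
      · have hcond : (m &&& (1 <<< i) != 0) = true := by
          rw [bne_iff_ne]; exact (pv_and_shift_iff m i).mpr hmb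
        rw [if_pos hcond]
        cases t with
        | mk ch wc bm =>
            show countValid
                (PVTrie.mk (chSet ch i (insertBits (bumpBm ((chGet? ch i).getD pvEmptyNode) i) m (i+1))) wc bm)
                pm fb hf = _
            rw [countValid_mk, countValidCh_chSet, countValid_mk]
            by_cases hpm : pm.testBit i = true
            · have hpe : (pm &&& (1 <<< i) != 0) = true := by
                rw [bne_iff_ne]; exact (pv_and_shift_iff pm i).mpr hpm
              rw [pvContrib, pvContrib, if_pos hpe, if_pos hpe]
              rw [ih (i + 1) _ _ (by omega), countValid_bumpBm]
              rw [if_congr (pvCond_step_set m pm fb i hf hlt hmb hpm) rfl rfl]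
              omega
            · have hpe : (pm &&& (1 <<< i) != 0) = false := by
                rw [bne_eq_false_iff_eq]
                by_contra hne
                exact hpm ((pv_and_shift_iff pm i).mp hne)
              simp only [pvContrib, hpe, Bool.false_eq_true, if_false]
              rw [if_neg (pvCond_fail m pm fb i hf hlt hmb (by simpa using hpm))]
              omega
      · have hcond : (m &&& (1 <<< i) != 0) = false := by
          rw [bne_eq_false_iff_eq]
          by_contra hne
          exact hmb ((pv_and_shift_iff m i).mp hne)
        rw [if_neg (by simp [hcond])]
        rw [ih (i + 1) _ _ (by omega)]
        rw [if_congr (pvCond_step_unset m pm fb i hf (by simpa using hmb)) rfl rfl]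

-- masks of all-lowercase words are 26-bit
theorem strMask_lt (s : String) (h : ∀ c ∈ s.toList, 97 ≤ c.toNat ∧ c.toNat ≤ 122) :
    strMask s < 2 ^ 26 := by
  unfold strMask
  have : ∀ (l : List Char) (acc : Nat), (∀ c ∈ l, 97 ≤ c.toNat ∧ c.toNat ≤ 122) → acc < 2 ^ 26 →
      l.foldl (fun m c => m ||| (1 <<< (c.toNat - 97))) acc < 2 ^ 26 := by
    intro l
    induction l with
    | nil => intro acc _ ha; simpa using ha
    | cons c l ihl =>
        intro acc hl ha
        simp only [List.foldl_cons]
        apply ihl _ (fun c hc => hl c (List.mem_cons_of_mem _ hc))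
        apply Nat.or_lt_two_pow ha
        have hc := hl c (List.mem_cons_self ..)
        rw [Nat.one_shiftLeft]
        exact Nat.pow_lt_pow_right (by omega) (by omega)
  exact this _ 0 h (by norm_num)

-- A's trie answer, characterised as a filter length
theorem countValid_build (pm fb : Nat) :
    ∀ (masks : List Nat) (t : PVTrie), (∀ m ∈ masks, m < 2 ^ 26) →
      countValid (masks.foldl (fun r m => insertBits r m 0) t) pm fb false =
        countValid t pm fb false +
          ((masks.filter (fun m => m &&& fb != 0 && (m ||| pm) == pm)).length : Int) := by
  intro masks
  induction masks with
  | nil => intro t _; simp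
  | cons m rest ih =>
      intro t hlt
      simp only [List.foldl_cons]
      rw [ih _ (fun x hx => hlt x (List.mem_cons_of_mem _ hx))]
      have hm : m < 2 ^ 26 := hlt m (List.mem_cons_self ..)
      rw [countValid_insertBits pm fb m 26 0 t false rfl]
      rw [if_congr (pvCond_zero m pm fb hm) rfl rfl]
      rw [List.filter_cons]
      by_cases hc : (m &&& fb != 0 && ((m ||| pm) == pm)) = true
      · simp only [hc, if_true, List.length_cons]
        push_cast
        omega
      · rw [Bool.not_eq_true] at hc
        simp only [hc, Bool.false_eq_true, if_false]
        omega

-- B's generic filtered-sum loop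
theorem foldl_ite_add (l : List (Nat × Int)) (Q : Nat → Bool) (a : Int) :
    l.foldl (fun acc kv => if Q kv.1 then acc + kv.2 else acc) a =
      a + ((l.filter (fun kv => Q kv.1)).map (fun kv => kv.2)).sum := by
  induction l generalizing a with
  | nil => simp
  | cons kv l ihl =>
      simp only [List.foldl_cons, List.filter_cons]
      by_cases hq : Q kv.1 = true
      · simp [hq, ihl]; omega
      · simp at hq; simp [hq, ihl]

-- casting a sum of Nat counts to Int
theorem pv_sum_natCast (l : List Nat) (c : Nat → Nat) :
    (l.map (fun k => ((c k : Nat) : Int))).sum = ((l.map c).sum : Int) := by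
  induction l with
  | nil => simp
  | cons a l ih => simp [ih]

-- B's counter scan equals the same filter length
theorem counter_sum (masks : List Nat) (Q : Nat → Bool) :
    ((((PySem.Set.ofList masks).map (fun k => (k, (masks.count k : Int)))).filter
        (fun kv => Q kv.1)).map (fun kv => kv.2)).sum = ((masks.filter Q).length : Int) := by
  rw [List.filter_map, List.map_map]
  have hpred : ((fun kv : Nat × Int => Q kv.1) ∘ (fun k => (k, (masks.count k : Int)))) = Q := rfl
  have hfun : ((fun kv : Nat × Int => kv.2) ∘ (fun k => (k, (masks.count k : Int)))) =
      fun k => (masks.count k : Int) := rfl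
  rw [hpred, hfun]
  have hperm : ((PySem.Set.ofList masks).filter Q).Perm ((masks.filter Q).dedup) := by
    refine (List.perm_ext_iff_of_nodup (List.Nodup.filter Q (PySem.Set.nodup_ofList masks))
      (List.nodup_dedup _)).mpr ?_
    intro a
    simp [List.mem_filter, PySem.Set.mem_ofList, List.mem_dedup]
  rw [List.Perm.sum_eq (hperm.map _)]
  have hcnt : ∀ k ∈ (masks.filter Q).dedup, (masks.count k : Int) = ((masks.filter Q).count k : Int) := by
    intro k hk
    have hq : Q k = true := (List.mem_filter.mp (List.mem_dedup.mp hk)).2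
    rw [List.count_filter hq]
  rw [List.map_congr_left hcnt, pv_sum_natCast, List.sum_map_count_dedup_eq_length]

-- the per-puzzle answers of the two ports, as functions of the prebuilt structures
def pvGA (root : PVTrie) (p : String) : Int :=
  match PySem.Str.pyGet? p 0 with
  | some c => countValid root (strMask p) (1 <<< (c.toNat - 97)) false
  | none => 0

def pvGB (counts : PySem.Dict Nat Int) (p : String) : Int :=
  let pm := strMask p
  match PySem.Str.pyGet? p 0 with
  | some c =>
    let fb := 1 <<< (c.toNat - 97)
    counts.items.foldl
      (fun acc kv => if kv.1 &&& fb != 0 && (kv.1 ||| pm) == pm then acc + kv.2 else acc) 0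
  | none => 0

theorem pv_foldl_opt {α : Type} (g : String → α) (F : List α → String → List α)
    (hF : ∀ res p, F res p = res ++ [g p]) :
    ∀ (ps : List String) (acc : List α), ps.foldl F acc = acc ++ ps.map g := by
  intro ps
  induction ps with
  | nil => intro acc; simp
  | cons p ps ih => intro acc; simp [hF, ih]

theorem pvA_eq_map (words puzzles : List String) :
    find_num_words_trie_bitmask words puzzles =
      puzzles.map (pvGA (words.foldl (fun r w => insertBits r (strMask w) 0) pvEmptyNode)) := by
  unfold find_num_words_trie_bitmask
  refine (pv_foldl_opt _ _ ?_ puzzles []).trans (List.nil_append _)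
  intro res p
  unfold pvGA
  cases h : PySem.Str.pyGet? p 0 <;> simp

theorem pvB_eq_map (words puzzles : List String) :
    find_num_words_trie_bitmask_alt words puzzles =
      puzzles.map (pvGB (words.foldl
        (fun d w => d.modify (strMask w) 0 (fun v => v + 1)) PySem.Dict.empty)) := by
  unfold find_num_words_trie_bitmask_alt
  refine (pv_foldl_opt _ _ ?_ puzzles []).trans (List.nil_append _)
  intro res p
  unfold pvGB
  cases h : PySem.Str.pyGet? p 0 <;> simp

-- ===== VERDICT (by name: the statement is the Claim_ definition above) =====
theorem find_num_words_trie_bitmask_spec : Claim_equal_find_num_words_trie_bitmask := by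
  intro words puzzles _ hpre
  unfold Pre_find_num_words_trie_bitmask at hpre
  simp only [Bool.and_eq_true, List.all_eq_true, decide_eq_true_iff] at hpre
  obtain ⟨hw, _⟩ := hpre
  unfold Spec_find_num_words_trie_bitmask
  rw [pvA_eq_map, pvB_eq_map]
  apply List.map_congr_left
  intro p _
  unfold pvGA pvGB
  cases h : PySem.Str.pyGet? p 0 with
  | none => rfl
  | some c =>
      simp only []
      -- A side
      have hmasks : ∀ m ∈ words.map strMask, m < 2 ^ 26 := by
        intro m hm
        obtain ⟨w, hwmem, rfl⟩ := List.mem_map.mp hm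
        exact strMask_lt w (hw w hwmem)
      have hroot : words.foldl (fun r w => insertBits r (strMask w) 0) pvEmptyNode =
          (words.map strMask).foldl (fun r m => insertBits r m 0) pvEmptyNode :=
        (List.foldl_map (f := strMask) (g := fun r m => insertBits r m 0)
          (l := words) (init := pvEmptyNode)).symm
      rw [hroot, countValid_build (strMask p) (1 <<< (c.toNat - 97)) (words.map strMask) _ hmasks,
        countValid_empty, zero_add]
      -- B side
      have hc : words.foldl (fun d w => d.modify (strMask w) 0 (fun v => v + 1)) PySem.Dict.empty =
          PySem.Dict.counter (words.map strMask) := by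
        rw [PySem.Dict.counter_eq_foldl]
        exact (List.foldl_map (f := strMask) (g := fun (d : PySem.Dict Nat Int) (m : Nat) => d.modify m 0 (· + 1))
            (l := words) (init := PySem.Dict.empty)).symm
      rw [hc, PySem.Dict.items_counter]
      rw [foldl_ite_add _ (fun m =>
        m &&& (1 <<< (c.toNat - 97)) != 0 && ((m ||| strMask p) == strMask p)) 0]
      rw [counter_sum (words.map strMask) (fun m =>
        m &&& (1 <<< (c.toNat - 97)) != 0 && ((m ||| strMask p) == strMask p))]
      rw [zero_add]
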